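-- pv_equiv track=rewrite | github.com/vrajeshsh/python-practice | 06. Strings/02. Word Applns/14. Swap any 2 words.py | getWordAt
-- ===== SOURCE A (Python) =====
-- def getWordAt(sent, pos):
--     count, word= 0, ""
--     for ch in sent:
--         if ch.isalnum():
--             word+=ch
--         elif ch!="":
--             count+=1
--             if count==pos:
--                 return word
--             word=""
--     return ""
-- ===== SOURCE B (Python) =====
-- def getWordAt(sent, pos):
--     parts = ''.join(ch if ch.isalnum() else '\x00' for ch in sent).split('\x00')
--     return parts[pos - 1] if 1 <= pos < len(parts) else ""
-- ===== Notes on version B (the rewrite author's own statement) =====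
-- stated objective: simpler
-- what changed: Replaces A's char-by-char loop with running word/count accumulators and an early return by a whole-string transform (non-alnum chars mapped to a sentinel), one split on the sentinel, and a single guarded index parts[pos-1].
import Mathlib
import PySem

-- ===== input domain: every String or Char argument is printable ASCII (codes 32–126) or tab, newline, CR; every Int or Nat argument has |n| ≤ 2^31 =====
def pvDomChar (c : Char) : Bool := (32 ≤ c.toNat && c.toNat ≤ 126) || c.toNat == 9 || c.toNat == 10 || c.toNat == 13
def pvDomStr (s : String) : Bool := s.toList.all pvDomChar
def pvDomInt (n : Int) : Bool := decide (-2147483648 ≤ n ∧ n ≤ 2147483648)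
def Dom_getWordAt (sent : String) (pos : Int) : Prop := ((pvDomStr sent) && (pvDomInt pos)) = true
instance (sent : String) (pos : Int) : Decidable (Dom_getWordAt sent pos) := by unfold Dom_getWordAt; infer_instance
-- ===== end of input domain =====

-- B replaces A's char-by-char accumulator loop by a whole-string transform + split + single index (same result; a different decomposition, not faster).

-- ===== PORT A =====
-- A's for-loop with early return, as structural recursion over the characters;
-- the `elif ch != ""` test is always true for a single character and is dropped.
def getWordAtGo (pos : Int) : List Char → Int → List Char → String
  | [], _, _ => ""
  | c :: rest, count, word =>
    if PySem.Chars.isalnum c then getWordAtGo pos rest count (word ++ [c])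
    else if count + 1 = pos then String.mk word
    else getWordAtGo pos rest (count + 1) []

def getWordAt (sent : String) (pos : Int) : String :=
  getWordAtGo pos sent.toList 0 []

-- ===== PORT B =====
-- ch if ch.isalnum() else '\x00'
def pvMapNull (c : Char) : Char := if PySem.Chars.isalnum c then c else '\x00'

-- parts = ''.join(...).split('\x00'); return parts[pos-1] if 1 <= pos < len(parts) else ""
-- (the guard makes the index in range, so List.getD is the faithful parts[pos-1])
def getWordAt_alt (sent : String) (pos : Int) : String :=
  let parts := (sent.toList.map pvMapNull).splitOn '\x00'
  if 1 ≤ pos ∧ pos < (parts.length : Int) then String.mk (parts.getD (pos - 1).toNat []) else ""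

-- ===== PRECONDITION & SPEC =====
def Spec_getWordAt (sent : String) (pos : Int) (out : String) : Prop := out = getWordAt_alt sent pos
instance (sent : String) (pos : Int) (out : String) : Decidable (Spec_getWordAt sent pos out) := by unfold Spec_getWordAt; infer_instance

-- ===== CLAIM (what is proved, stated in full; the proofs are below) =====
def Claim_equal_getWordAt : Prop := ∀ (sent : String) (pos : Int), Dom_getWordAt sent pos → Spec_getWordAt sent pos (getWordAt sent pos)

-- ===== LEMMAS AND PROOFS =====

theorem pvMapNull_of_alnum {c : Char} (h : PySem.Chars.isalnum c = true) :
    pvMapNull c = c := by simp [pvMapNull, h]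

theorem pvMapNull_of_not_alnum {c : Char} (h : ¬ PySem.Chars.isalnum c = true) :
    pvMapNull c = '\x00' := by simp [pvMapNull, h]

theorem alnum_ne_null {c : Char} (h : PySem.Chars.isalnum c = true) : (c == '\x00') = false := by
  by_contra hc
  have : c = '\x00' := by
    cases h' : (c == '\x00') with
    | false => exact absurd h' hc
    | true => exact beq_iff_eq.mp h'
  subst this
  exact absurd h (by decide)

-- the loop invariant: A's remaining loop on (chars, count, word) is B's split-and-index
-- on the remaining characters, with the in-progress word prefixed to the first segment
theorem getWordAtGo_eq (pos : Int) (chars : List Char) : ∀ (count : Int) (word : List Char),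
    getWordAtGo pos chars count word =
      (if count + 1 ≤ pos ∧ pos < count + (((chars.map pvMapNull).splitOn '\x00').length : Int) then
         String.mk ((if pos = count + 1 then word else []) ++
           ((chars.map pvMapNull).splitOn '\x00').getD (pos - count - 1).toNat [])
       else "") := by
  induction chars with
  | nil =>
    intro count word
    rw [show getWordAtGo pos [] count word = "" from rfl]
    rw [List.map_nil, List.splitOn_nil]
    rw [if_neg (by simp only [List.length_cons, List.length_nil]; omega)]
  | cons c rest ih =>
    intro count word
    have hne : (rest.map pvMapNull).splitOn '\x00' ≠ [] := List.splitOnP_ne_nil _ _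
    obtain ⟨p0, ptail, hp⟩ := List.exists_cons_of_ne_nil hne
    by_cases hc : PySem.Chars.isalnum c = true
    · -- alnum: word grows, first segment grows
      rw [show getWordAtGo pos (c :: rest) count word
            = getWordAtGo pos rest count (word ++ [c]) by
          simp only [getWordAtGo, hc, if_true]]
      rw [ih, List.map_cons, pvMapNull_of_alnum hc]
      rw [show ((c :: rest.map pvMapNull).splitOn '\x00')
            = ((rest.map pvMapNull).splitOn '\x00').modifyHead (c :: ·) by
          simp [List.splitOn, List.splitOnP_cons, alnum_ne_null hc]]
      rw [hp, List.modifyHead_cons]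
      simp only [List.length_cons]
      by_cases hcond : count + 1 ≤ pos ∧ pos < count + ((ptail.length + 1 : Nat) : Int)
      · rw [if_pos hcond, if_pos hcond]
        by_cases hp1 : pos = count + 1
        · rw [if_pos hp1, if_pos hp1]
          have h0 : (pos - count - 1).toNat = 0 := by omega
          rw [h0, List.getD_cons_zero, List.getD_cons_zero, List.append_assoc,
            List.singleton_append]
        · rw [if_neg hp1, if_neg hp1]
          have hge : 1 ≤ (pos - count - 1).toNat := by omega
          obtain ⟨k, hk⟩ : ∃ k, (pos - count - 1).toNat = k + 1 :=
            ⟨_, (Nat.succ_pred_eq_of_pos hge).symm⟩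
          rw [hk, List.getD_cons_succ, List.getD_cons_succ]
      · rw [if_neg hcond, if_neg hcond]
    · -- delimiter: either return the word now, or recurse with count+1 and empty word
      rw [show getWordAtGo pos (c :: rest) count word
            = if count + 1 = pos then String.mk word
              else getWordAtGo pos rest (count + 1) [] by
          simp only [getWordAtGo, if_neg hc]]
      rw [List.map_cons, pvMapNull_of_not_alnum hc]
      rw [show (('\x00' :: rest.map pvMapNull).splitOn '\x00')
            = [] :: (rest.map pvMapNull).splitOn '\x00' by
          simp [List.splitOn, List.splitOnP_cons]]
      rw [hp]
      simp only [List.length_cons]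
      by_cases hp1 : count + 1 = pos
      · rw [if_pos hp1]
        rw [if_pos (show count + 1 ≤ pos ∧ pos < count + ((ptail.length + 1 + 1 : Nat) : Int) by
          omega)]
        rw [if_pos hp1.symm]
        have h0 : (pos - count - 1).toNat = 0 := by omega
        rw [h0, List.getD_cons_zero, List.append_nil]
      · rw [if_neg hp1, ih, hp]
        simp only [List.length_cons]
        by_cases hcond : count + 1 + 1 ≤ pos ∧ pos < count + 1 + ((ptail.length + 1 : Nat) : Int)
        · rw [if_pos hcond]
          rw [if_pos (show count + 1 ≤ pos ∧ pos < count + ((ptail.length + 1 + 1 : Nat) : Int) by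
            omega)]
          rw [if_neg (show ¬ pos = count + 1 by omega)]
          have hge : 1 ≤ (pos - count - 1).toNat := by omega
          obtain ⟨k, hk⟩ : ∃ k, (pos - count - 1).toNat = k + 1 :=
            ⟨_, (Nat.succ_pred_eq_of_pos hge).symm⟩
          have hk2 : (pos - (count + 1) - 1).toNat = k := by omega
          rw [hk, hk2, List.getD_cons_succ, ite_self, List.nil_append]
        · rw [if_neg hcond]
          rw [if_neg (show ¬ (count + 1 ≤ pos ∧ pos < count + ((ptail.length + 1 + 1 : Nat) : Int))
            by omega)]

-- ===== VERDICT (by name: the statement is the Claim_ definition above) =====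
theorem getWordAt_spec : Claim_equal_getWordAt := by
  intro sent pos _
  unfold Spec_getWordAt getWordAt getWordAt_alt
  rw [getWordAtGo_eq]
  by_cases hcond : 1 ≤ pos ∧ pos < (((sent.toList.map pvMapNull).splitOn '\x00').length : Int)
  · rw [if_pos hcond, if_pos (show (0:Int) + 1 ≤ pos ∧
        pos < 0 + (((sent.toList.map pvMapNull).splitOn '\x00').length : Int) by omega)]
    have hi : (pos - 0 - 1).toNat = (pos - 1).toNat := by omega
    rw [hi]
    by_cases hp1 : pos = 0 + 1
    · rw [if_pos hp1, List.nil_append]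
    · rw [if_neg hp1, List.nil_append]
  · rw [if_neg hcond, if_neg (show ¬ ((0:Int) + 1 ≤ pos ∧
        pos < 0 + (((sent.toList.map pvMapNull).splitOn '\x00').length : Int)) by omega)]
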